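-- pv_equiv track=rewrite | github.com/nuncaeslupus/research-buddy | src/research_buddy/clean_md.py | strip_framework_block
-- ===== SOURCE A (Python) =====
-- FRAMEWORK_START = "<!-- @anchor: framework.core -->"
--
-- FRAMEWORK_END = "<!-- @end: framework.reference -->"
--
-- def strip_framework_block(text: str) -> str:
--     """Remove the framework block plus its trailing horizontal-rule separator.
--
--     The leading --- (between title and framework) is preserved — it becomes
--     the separator between the title and the next non-framework section.
--     """
--     lines = text.splitlines()
--     out: list[str] = []
--     i = 0
--     while i < len(lines):
--         line = lines[i]
--         if line.strip() == FRAMEWORK_START: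
--             # Find the matching end
--             j = i
--             while j < len(lines) and lines[j].strip() != FRAMEWORK_END:
--                 j += 1
--             if j >= len(lines):
--                 # Malformed: framework opener with no closer. Leave the file
--                 # untouched in that section to avoid silently destroying content.
--                 break
--             j += 1  # past @end line
--             # Skip trailing blank lines plus at most one --- separator
--             while j < len(lines) and lines[j].strip() == "":
--                 j += 1
--             if j < len(lines) and lines[j].strip() == "---":
--                 j += 1
--             i = j
--             continue
--         out.append(line)
--         i += 1
--     text = "\n".join(out)
--     if not text.endswith("\n"):
--         text += "\n"
--     return text
-- ===== SOURCE B (Python) =====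
-- FRAMEWORK_START = "<!-- @anchor: framework.core -->"
--
-- FRAMEWORK_END = "<!-- @end: framework.reference -->"
--
-- def strip_framework_block(text: str) -> str:
--     """Two-pass rewrite: first collect [start, end) index ranges to delete,
--     then keep exactly the lines whose index falls in no collected range."""
--     lines = text.splitlines()
--     n = len(lines)
--     # Pass 1: collect ranges to delete.
--     ranges = []
--     i = 0
--     while i < n:
--         if lines[i].strip() == FRAMEWORK_START:
--             j = i
--             while j < n and lines[j].strip() != FRAMEWORK_END:
--                 j += 1
--             if j >= n:
--                 # No closer: the original stops copying here, dropping the rest.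
--                 ranges.append((i, n))
--                 break
--             j += 1  # past the @end line
--             while j < n and lines[j].strip() == "":
--                 j += 1
--             if j < n and lines[j].strip() == "---":
--                 j += 1
--             ranges.append((i, j))
--             i = j
--         else:
--             i += 1
--     # Pass 2: keep the lines outside every deleted range.
--     kept = [line for k, line in enumerate(lines)
--             if not any(a <= k < b for a, b in ranges)]
--     result = "\n".join(kept)
--     return result if result.endswith("\n") else result + "\n"
-- ===== Notes on version B (the rewrite author's own statement) =====
-- stated objective: alternative
-- what changed: A deletes framework blocks while copying lines in a single accumulate-as-you-go loop; B first collects the [start,end) index ranges to delete and then keeps exactly the lines whose index falls in no collected range.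
import Mathlib
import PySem

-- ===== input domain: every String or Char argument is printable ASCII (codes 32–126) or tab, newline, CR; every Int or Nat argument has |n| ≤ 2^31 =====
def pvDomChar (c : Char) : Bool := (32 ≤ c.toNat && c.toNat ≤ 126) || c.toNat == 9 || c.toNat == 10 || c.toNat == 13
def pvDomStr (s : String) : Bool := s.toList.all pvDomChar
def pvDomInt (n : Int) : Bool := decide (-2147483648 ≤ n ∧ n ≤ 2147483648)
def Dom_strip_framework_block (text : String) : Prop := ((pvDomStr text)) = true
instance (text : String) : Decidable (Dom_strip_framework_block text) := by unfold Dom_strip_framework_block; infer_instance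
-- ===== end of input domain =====

-- B replaces A's single copy-as-you-go loop by two passes (collect delete-ranges, then filter
-- the lines by index); objective: alternative decomposition, same cost.

-- shared constants and the two inner `while` scans (identical source code in A and B)
def fwStart : String := "<!-- @anchor: framework.core -->"
def fwEnd : String := "<!-- @end: framework.reference -->"

-- `while j < len(lines) and lines[j].strip() != FRAMEWORK_END: j += 1`
def findEnd (lines : List String) (j : Nat) : Nat :=
  if h : j < lines.length then
    if PySem.Str.strip lines[j] != fwEnd then findEnd lines (j + 1) else j
  else j
termination_by lines.length - j

theorem findEnd_ge (lines : List String) (j : Nat) : j ≤ findEnd lines j := by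
  unfold findEnd
  split
  · split
    · exact le_trans (Nat.le_succ j) (findEnd_ge lines (j + 1))
    · exact le_refl j
  · exact le_refl j
termination_by lines.length - j

-- `while j < len(lines) and lines[j].strip() == "": j += 1`
def skipBlank (lines : List String) (j : Nat) : Nat :=
  if h : j < lines.length then
    if PySem.Str.strip lines[j] == "" then skipBlank lines (j + 1) else j
  else j
termination_by lines.length - j

theorem skipBlank_ge (lines : List String) (j : Nat) : j ≤ skipBlank lines j := by
  unfold skipBlank
  split
  · split
    · exact le_trans (Nat.le_succ j) (skipBlank_ge lines (j + 1))
    · exact le_refl j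
  · exact le_refl j
termination_by lines.length - j

-- `j += 1; skip blanks; skip at most one '---'` (identical tail code in A and B)
def nextIdx (lines : List String) (j : Nat) : Nat :=
  let j1 := skipBlank lines (j + 1)
  if h : j1 < lines.length then
    if PySem.Str.strip lines[j1] == "---" then j1 + 1 else j1
  else j1

theorem nextIdx_gt (lines : List String) (j : Nat) : j < nextIdx lines j := by
  simp only [nextIdx]
  have h1 := skipBlank_ge lines (j + 1)
  split
  · split <;> omega
  · omega

-- ===== PORT A =====
-- A's `while i < len(lines)` loop, accumulating `out`; `break` returns `out` as is.
def loopA (lines : List String) (i : Nat) (out : List String) : List String :=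
  if h : i < lines.length then
    if PySem.Str.strip lines[i] == fwStart then
      let j := findEnd lines i
      if hj : j < lines.length then
        loopA lines (nextIdx lines j) out
      else out
    else loopA lines (i + 1) (out ++ [lines[i]])
  else out
termination_by lines.length - i
decreasing_by
  · have h1 := findEnd_ge lines i
    have h2 := nextIdx_gt lines (findEnd lines i)
    omega
  · omega

def strip_framework_block (text : String) : String :=
  let lines := PySem.Str.splitlines text
  let t := PySem.Str.join "\n" (loopA lines 0 [])
  if PySem.Str.endswith t "\n" then t else t ++ "\n"

-- ===== PORT B =====
-- pass 1 of Source B: collect the [start, end) ranges to delete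
def scanRanges (lines : List String) (i : Nat) : List (Nat × Nat) :=
  if h : i < lines.length then
    if PySem.Str.strip lines[i] == fwStart then
      let j := findEnd lines i
      if hj : j < lines.length then
        (i, nextIdx lines j) :: scanRanges lines (nextIdx lines j)
      else [(i, lines.length)]
    else scanRanges lines (i + 1)
  else []
termination_by lines.length - i
decreasing_by
  · have h1 := findEnd_ge lines i
    have h2 := nextIdx_gt lines (findEnd lines i)
    omega
  · omega

def strip_framework_block_alt (text : String) : String :=
  let lines := PySem.Str.splitlines text
  let ranges := scanRanges lines 0
  -- pass 2 of Source B: keep the lines whose index is in no deleted range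
  let kept := ((PySem.List.enumerate lines 0).filter
      (fun p => !(ranges.any (fun r => decide ((r.1 : Int) ≤ p.1 ∧ p.1 < (r.2 : Int)))))).map (·.2)
  let result := PySem.Str.join "\n" kept
  if PySem.Str.endswith result "\n" then result else result ++ "\n"

-- ===== PRECONDITION & SPEC =====
def Spec_strip_framework_block (text : String) (out : String) : Prop := out = strip_framework_block_alt text
instance (text : String) (out : String) : Decidable (Spec_strip_framework_block text out) := by unfold Spec_strip_framework_block; infer_instance

-- ===== CLAIM (what is proved, stated in full; the proofs are below) =====
def Claim_equal_strip_framework_block : Prop := ∀ (text : String), Dom_strip_framework_block text → Spec_strip_framework_block text (strip_framework_block text)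

-- ===== LEMMAS AND PROOFS =====

theorem skipBlank_le (lines : List String) (j : Nat) (h : j ≤ lines.length) :
    skipBlank lines j ≤ lines.length := by
  unfold skipBlank
  split
  · split
    · exact skipBlank_le lines (j + 1) (by omega)
    · exact h
  · exact h
termination_by lines.length - j

theorem nextIdx_le_len (lines : List String) (j : Nat) (h : j + 1 ≤ lines.length) :
    nextIdx lines j ≤ lines.length := by
  simp only [nextIdx]
  have h1 := skipBlank_le lines (j + 1) h
  split
  · split <;> omega
  · exact h1

def inAnyN (rs : List (Nat × Nat)) (k : Nat) : Bool := rs.any (fun r => decide (r.1 ≤ k ∧ k < r.2))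

def keptAux (q : Nat → Bool) : List String → Nat → List String
  | [], _ => []
  | x :: xs, s => (if q s then [x] else []) ++ keptAux q xs (s + 1)

def K (lines : List String) (i : Nat) : List String :=
  keptAux (fun k => ! inAnyN (scanRanges lines i) k) (lines.drop i) i

theorem anyInt_eq (rs : List (Nat × Nat)) (k : Nat) :
    (rs.any fun r => decide ((r.1 : Int) ≤ (k : Int) ∧ (k : Int) < (r.2 : Int))) = inAnyN rs k := by
  simp [inAnyN]

theorem enumerate_bridge (rs : List (Nat × Nat)) :
    ∀ (xs : List String) (s : Nat),
    ((PySem.List.enumerate xs (s : Int)).filter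
      (fun p => !(rs.any (fun r => decide ((r.1 : Int) ≤ p.1 ∧ p.1 < (r.2 : Int)))))).map (·.2)
      = keptAux (fun k => ! inAnyN rs k) xs s := by
  intro xs
  induction xs with
  | nil => intro s; simp [PySem.List.enumerate_nil, keptAux]
  | cons x xs ih =>
    intro s
    rw [PySem.List.enumerate_cons, List.filter_cons,
      show (s : Int) + 1 = ((s + 1 : Nat) : Int) from by push_cast; ring]
    simp only [anyInt_eq, keptAux]
    by_cases hq : (!inAnyN rs s) = true
    · rw [if_pos hq, if_pos hq]
      simp only [List.map_cons, ih (s + 1), List.singleton_append]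
    · rw [if_neg hq, if_neg hq]
      simp only [ih (s + 1), List.nil_append]

theorem keptAux_nil_of (q : Nat → Bool) :
    ∀ (xs : List String) (s : Nat), (∀ k, s ≤ k → k < s + xs.length → q k = false) →
    keptAux q xs s = [] := by
  intro xs
  induction xs with
  | nil => intro s _; rfl
  | cons x xs ih =>
    intro s h
    have hs : q s = false := h s (le_refl s) (by simp)
    simp only [keptAux, hs, Bool.false_eq_true, if_false, List.nil_append]
    exact ih (s + 1) (fun k hk1 hk2 =>
      h k (by omega) (by simp only [List.length_cons] at hk2 ⊢; omega))

theorem keptAux_append (q : Nat → Bool) :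
    ∀ (xs ys : List String) (s : Nat),
    keptAux q (xs ++ ys) s = keptAux q xs s ++ keptAux q ys (s + xs.length) := by
  intro xs
  induction xs with
  | nil => intro ys s; simp [keptAux]
  | cons x xs ih =>
    intro ys s
    simp only [List.cons_append, keptAux, ih, List.append_assoc, List.length_cons,
      show s + 1 + xs.length = s + (xs.length + 1) from by omega]

theorem keptAux_congr (q q' : Nat → Bool) :
    ∀ (xs : List String) (s : Nat), (∀ k, s ≤ k → k < s + xs.length → q k = q' k) →
    keptAux q xs s = keptAux q' xs s := by
  intro xs
  induction xs with
  | nil => intro s _; rfl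
  | cons x xs ih =>
    intro s h
    simp only [keptAux, h s (le_refl s) (by simp)]
    rw [ih (s + 1) (fun k hk1 hk2 =>
      h k (by omega) (by simp only [List.length_cons] at hk2 ⊢; omega))]

theorem scanRanges_start_ge (lines : List String) :
    ∀ (i : Nat) (r : Nat × Nat), r ∈ scanRanges lines i → i ≤ r.1 := by
  intro i r hr
  rw [scanRanges] at hr
  by_cases hi : i < lines.length
  · by_cases hs : (PySem.Str.strip lines[i] == fwStart) = true
    · by_cases hj : findEnd lines i < lines.length
      · simp only [dif_pos hi, if_pos hs, dif_pos hj] at hr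
        rcases List.mem_cons.mp hr with h | h
        · subst h; rfl
        · have h1 := scanRanges_start_ge lines (nextIdx lines (findEnd lines i)) r h
          have h2 := findEnd_ge lines i
          have h3 := nextIdx_gt lines (findEnd lines i)
          omega
      · simp only [dif_pos hi, if_pos hs, dif_neg hj, List.mem_singleton] at hr
        subst hr
        exact le_refl i
    · simp only [dif_pos hi, if_neg hs] at hr
      have := scanRanges_start_ge lines (i + 1) r hr
      omega
  · simp only [dif_neg hi] at hr
    simp at hr
termination_by i => lines.length - i
decreasing_by
  · have h1 := findEnd_ge lines i
    have h2 := nextIdx_gt lines (findEnd lines i)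
    omega
  · omega

theorem loopA_eq (lines : List String) :
    ∀ (n i : Nat) (out : List String), lines.length - i ≤ n →
    loopA lines i out = out ++ K lines i := by
  intro n
  induction n with
  | zero =>
    intro i out hn
    have hi : ¬ i < lines.length := by omega
    rw [loopA]
    simp only [dif_neg hi]
    rw [K, List.drop_eq_nil_of_le (by omega)]
    simp [keptAux]
  | succ n ih =>
    intro i out hn
    by_cases hi : i < lines.length
    · by_cases hs : (PySem.Str.strip lines[i] == fwStart) = true
      · by_cases hj : findEnd lines i < lines.length
        · -- closer found: delete [i, j2) and continue at j2
          set j := findEnd lines i with hjdef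
          set j2 := nextIdx lines j with hj2def
          have hgt : i < j2 := by
            have h1 := findEnd_ge lines i
            have h2 := nextIdx_gt lines j
            omega
          have hle : j2 ≤ lines.length := nextIdx_le_len lines j (by omega)
          have hscan : scanRanges lines i = (i, j2) :: scanRanges lines j2 := by
            rw [scanRanges]
            simp only [dif_pos hi, if_pos hs, ← hjdef, dif_pos hj, ← hj2def]
          have hKK : K lines i = K lines j2 := by
            unfold K
            rw [hscan]
            have hsplit : lines.drop i = (lines.drop i).take (j2 - i) ++ lines.drop j2 := by
              conv_lhs => rw [← List.take_append_drop (j2 - i) (lines.drop i)]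
              rw [List.drop_drop, show i + (j2 - i) = j2 from by omega]
            rw [hsplit, keptAux_append]
            have hlen : ((lines.drop i).take (j2 - i)).length = j2 - i := by
              simp only [List.length_take, List.length_drop]
              omega
            rw [hlen, show i + (j2 - i) = j2 from by omega]
            have hfst : keptAux (fun k => !inAnyN ((i, j2) :: scanRanges lines j2) k)
                ((lines.drop i).take (j2 - i)) i = [] := by
              apply keptAux_nil_of
              intro k hk1 hk2
              rw [hlen] at hk2
              have hin : inAnyN ((i, j2) :: scanRanges lines j2) k = true := by
                simp only [inAnyN, List.any_cons, Bool.or_eq_true, decide_eq_true_eq]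
                exact Or.inl ⟨hk1, by omega⟩
              simp [hin]
            rw [hfst, List.nil_append]
            apply keptAux_congr
            intro k hk1 hk2
            have hd : decide (i ≤ k ∧ k < j2) = false := by
              simp only [decide_eq_false_iff_not]
              omega
            simp only [inAnyN, List.any_cons, hd, Bool.false_or]
          rw [loopA]
          simp only [dif_pos hi, if_pos hs, ← hjdef, dif_pos hj, ← hj2def]
          rw [ih j2 out (by omega), hKK]
        · -- malformed: break, drop everything from i on
          rw [loopA]
          simp only [dif_pos hi, if_pos hs, dif_neg hj]
          have hscan : scanRanges lines i = [(i, lines.length)] := by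
            rw [scanRanges]
            simp only [dif_pos hi, if_pos hs, dif_neg hj]
          rw [K, hscan]
          rw [keptAux_nil_of _ _ _ ?_]
          · simp
          · intro k hk1 hk2
            simp only [List.length_drop] at hk2
            have hin : inAnyN [(i, lines.length)] k = true := by
              simp only [inAnyN, List.any_cons, List.any_nil, Bool.or_false, decide_eq_true_eq]
              omega
            simp [hin]
      · -- ordinary line: keep it
        have hscan : scanRanges lines i = scanRanges lines (i + 1) := by
          rw [scanRanges]
          simp only [dif_pos hi, if_neg hs]
        have hKK : K lines i = lines[i] :: K lines (i + 1) := by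
          unfold K
          rw [hscan, List.drop_eq_getElem_cons hi]
          simp only [keptAux]
          have hq : (!inAnyN (scanRanges lines (i + 1)) i) = true := by
            rw [Bool.not_eq_true', inAnyN, List.any_eq_false]
            intro r hmem
            have h1 := scanRanges_start_ge lines (i + 1) r hmem
            intro hc
            have h2 := of_decide_eq_true hc
            omega
          rw [if_pos hq]
          rfl
        rw [loopA]
        simp only [dif_pos hi, if_neg hs]
        rw [ih (i + 1) (out ++ [lines[i]]) (by omega), hKK]
        simp
    · rw [loopA]
      simp only [dif_neg hi]
      rw [K, List.drop_eq_nil_of_le (by omega)]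
      simp [keptAux]

theorem kept_eq_K (lines : List String) :
    ((PySem.List.enumerate lines 0).filter
      (fun p => !((scanRanges lines 0).any (fun r => decide ((r.1 : Int) ≤ p.1 ∧ p.1 < (r.2 : Int)))))).map (·.2)
      = K lines 0 := by
  rw [show (0 : Int) = ((0 : Nat) : Int) from rfl,
    enumerate_bridge (scanRanges lines 0) lines 0, K, List.drop_zero]

-- ===== VERDICT (by name: the statement is the Claim_ definition above) =====
theorem strip_framework_block_spec : Claim_equal_strip_framework_block := by
  intro text _
  unfold Spec_strip_framework_block
  simp only [strip_framework_block, strip_framework_block_alt]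
  rw [loopA_eq (PySem.Str.splitlines text) (PySem.Str.splitlines text).length 0 [] (by omega)]
  rw [List.nil_append, ← kept_eq_K]
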